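-- pv_equiv track=rewrite | github.com/Hadipiano94/Musician_Assistant | main.py | is_subchord_by_n
-- ===== SOURCE A (Python) =====
-- def is_subchord_by_n(list_1, list_2, n):
--     if len(list_1) == 0 or len(list_2) == 0:
--         return False
--     else:
--         if n > len(list_1):
--             return False
--         elif n < 2:
--             if list_1[0] in list_2:
--                 return True
--             else:
--                 return False
--         else:
--             if len(list_1) <= n:
--                 if set(list_1).issubset(set(list_2)):
--                     return True
--                 else:
--                     return False
--             else:
--                 is_sublist = False
--                 for i in [0, -1]:
--                     new_list_1 = list_1.copy()
--                     new_list_1.remove(list_1[i])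
--                     if is_subchord_by_n(new_list_1, list_2, n):
--                         is_sublist = True
--                 return is_sublist
-- ===== SOURCE B (Python) =====
-- def is_subchord_by_n(list_1, list_2, n):
--     if len(list_1) == 0 or len(list_2) == 0:
--         return False
--     if n > len(list_1):
--         return False
--     if n < 2:
--         return list_1[0] in list_2
--     s2 = set(list_2)
--     frontier = {tuple(list_1)}
--     for _ in range(len(list_1) - n):
--         nxt = set()
--         for t in frontier:
--             nxt.add(t[1:])
--             u = list(t)
--             u.remove(u[-1])
--             nxt.add(tuple(u))
--         frontier = nxt
--     return any(set(t) <= s2 for t in frontier)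
-- ===== Notes on version B (the rewrite author's own statement) =====
-- stated objective: faster
-- what changed: A's exponential two-way recursion (remove head / remove first occurrence of the last element) is replaced by a level-by-level BFS keeping the SET of distinct reachable sublists per level, deduplicating the 2^(len-n) recursion paths; intended as faster — a timing run measured B 16x at n=16, 1399x at n=64 and A timing out at larger sizes where B returns in under 1 ms, though its sample rule left the label unconfirmed.
import Mathlib
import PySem

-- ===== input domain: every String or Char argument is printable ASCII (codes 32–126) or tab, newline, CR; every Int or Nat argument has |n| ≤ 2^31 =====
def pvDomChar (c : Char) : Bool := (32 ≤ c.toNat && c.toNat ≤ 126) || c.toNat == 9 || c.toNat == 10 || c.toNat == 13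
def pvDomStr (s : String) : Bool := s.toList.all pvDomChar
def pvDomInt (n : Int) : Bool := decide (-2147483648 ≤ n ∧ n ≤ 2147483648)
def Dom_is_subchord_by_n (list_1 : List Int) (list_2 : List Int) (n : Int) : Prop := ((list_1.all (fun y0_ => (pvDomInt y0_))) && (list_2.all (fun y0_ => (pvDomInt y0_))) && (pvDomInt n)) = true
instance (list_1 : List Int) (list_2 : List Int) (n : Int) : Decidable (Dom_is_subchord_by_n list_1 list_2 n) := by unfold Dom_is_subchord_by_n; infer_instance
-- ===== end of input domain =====

-- B replaces A's exponential branching recursion (remove head / remove first occurrence of the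
-- last element) by a level-by-level BFS over the SET of reachable sublists, deduplicating
-- states; objective: intended as faster (timing: B 16x at n=16, 1399x at n=64, A timed
-- out beyond that where B returned; the probe's sample rule left the label unconfirmed).


-- ===== PORT A =====
-- new_list_1 = list_1.copy(); new_list_1.remove(list_1[i])  (first occurrence; list_1 nonempty here)
def pvARemoveAt (list_1 : List Int) (i : Int) : List Int :=
  (PySem.List.remove? list_1 ((PySem.List.pyGet? list_1 i).getD 0)).getD list_1

-- termination helpers for the recursion of A (each child is one element shorter)
theorem pvARemoveAt_head_lt (h : Int) (t : List Int) :
    (pvARemoveAt (h :: t) 0).length < (h :: t).length := by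
  simp [pvARemoveAt, PySem.List.pyGet?, PySem.List.pyIdx?]

theorem pvARemoveAt_last_length (h : Int) (t : List Int) :
    (pvARemoveAt (h :: t) (-1)).length = t.length := by
  have hmem : (h :: t).getLast (by simp) ∈ h :: t := List.getLast_mem _
  have hget : PySem.List.pyGet? (h :: t) (-1) = some ((h :: t).getLast (by simp)) := by
    simp [PySem.List.pyGet?, PySem.List.pyIdx?, List.getLast_eq_getElem]
    rfl
  rw [pvARemoveAt, hget, Option.getD_some, PySem.List.remove?_eq_some_erase _ _ hmem,
    Option.getD_some, List.length_erase_of_mem hmem]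
  simp

def is_subchord_by_n (list_1 : List Int) (list_2 : List Int) (n : Int) : Bool :=
  if list_1.length = 0 ∨ list_2.length = 0 then false
  else if n > (list_1.length : Int) then false
  else if n < 2 then list_2.contains list_1.headI   -- list_1[0] in list_2 (list_1 nonempty here)
  else if (list_1.length : Int) ≤ n then
    PySem.Set.issubset (PySem.Set.ofList list_1) (PySem.Set.ofList list_2)
  else
    -- for i in [0, -1]: is_sublist |= recurse(list_1 minus first occurrence of list_1[i])
    is_subchord_by_n (pvARemoveAt list_1 0) list_2 n
      || is_subchord_by_n (pvARemoveAt list_1 (-1)) list_2 n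
termination_by list_1.length
decreasing_by
  · cases list_1 with
    | nil => simp_all
    | cons h t => exact pvARemoveAt_head_lt h t
  · cases list_1 with
    | nil => simp_all
    | cons h t => rw [pvARemoveAt_last_length h t]; simp

-- ===== PORT B =====
-- u = list(t); u.remove(u[-1])
def pvBRmLast (t : List Int) : List Int :=
  (PySem.List.remove? t ((PySem.List.pyGet? t (-1)).getD 0)).getD t

-- one BFS level: nxt = set(); for t in frontier: nxt.add(t[1:]); nxt.add(u)
def pvBStep (fr : PySem.Set (List Int)) : PySem.Set (List Int) :=
  fr.foldl (fun nxt t => PySem.Set.add (PySem.Set.add nxt t.tail) (pvBRmLast t)) PySem.Set.empty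

-- for _ in range(k): frontier = step(frontier)
def pvBIter : Nat → PySem.Set (List Int) → PySem.Set (List Int)
  | 0, fr => fr
  | k + 1, fr => pvBIter k (pvBStep fr)

def is_subchord_by_n_alt (list_1 : List Int) (list_2 : List Int) (n : Int) : Bool :=
  if list_1.length = 0 ∨ list_2.length = 0 then false
  else if n > (list_1.length : Int) then false
  else if n < 2 then list_2.contains list_1.headI
  else
    let s2 := PySem.Set.ofList list_2
    let frontier := pvBIter (list_1.length - n.toNat) (PySem.Set.add PySem.Set.empty list_1)
    frontier.any (fun t => PySem.Set.issubset (PySem.Set.ofList t) s2)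

-- ===== PRECONDITION & SPEC =====
def Spec_is_subchord_by_n (list_1 : List Int) (list_2 : List Int) (n : Int) (out : Bool) : Prop := out = is_subchord_by_n_alt list_1 list_2 n
instance (list_1 : List Int) (list_2 : List Int) (n : Int) (out : Bool) : Decidable (Spec_is_subchord_by_n list_1 list_2 n out) := by unfold Spec_is_subchord_by_n; infer_instance

-- ===== CLAIM (what is proved, stated in full; the proofs are below) =====
def Claim_equal_is_subchord_by_n : Prop := ∀ (list_1 : List Int) (list_2 : List Int) (n : Int), Dom_is_subchord_by_n list_1 list_2 n → Spec_is_subchord_by_n list_1 list_2 n (is_subchord_by_n list_1 list_2 n)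

-- ===== LEMMAS AND PROOFS =====

-- "reach-any": the OR of p over all states reachable from l in exactly k steps
def pvReachAny (p : List Int → Bool) : Nat → List Int → Bool
  | 0, l => p l
  | k + 1, l => pvReachAny p k l.tail || pvReachAny p k (pvBRmLast l)

-- any over a Set.add: duplicates do not matter for any
theorem pv_any_add (s : List (List Int)) (x : List Int) (p : List Int → Bool) :
    (PySem.Set.add s x).any p = (s.any p || p x) := by
  by_cases hx : x ∈ s
  · have hadd : PySem.Set.add s x = s := by simp [PySem.Set.add, hx]
    rw [hadd]
    by_cases hpx : p x = true
    · simp [hpx, List.any_eq_true.mpr ⟨x, hx, hpx⟩]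
    · simp [Bool.eq_false_iff.mpr hpx]
  · have hadd : PySem.Set.add s x = s ++ [x] := by simp [PySem.Set.add, hx]
    rw [hadd]; simp

theorem pv_any_foldl (fr : List (List Int)) (acc : List (List Int)) (p : List Int → Bool) :
    ((fr.foldl (fun nxt t => PySem.Set.add (PySem.Set.add nxt t.tail) (pvBRmLast t)) acc).any p)
      = (acc.any p || fr.any (fun t => p t.tail || p (pvBRmLast t))) := by
  induction fr generalizing acc with
  | nil => simp
  | cons h tl ih =>
    simp only [List.foldl_cons, List.any_cons, ih, pv_any_add]
    cases acc.any p <;> cases p h.tail <;> cases p (pvBRmLast h) <;> simp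

theorem pv_step_any (fr : PySem.Set (List Int)) (p : List Int → Bool) :
    (pvBStep fr).any p = fr.any (fun t => p t.tail || p (pvBRmLast t)) := by
  simpa [PySem.Set.empty] using pv_any_foldl fr [] p

theorem pv_iter_any (k : Nat) (fr : PySem.Set (List Int)) (p : List Int → Bool) :
    (pvBIter k fr).any p = fr.any (fun t => pvReachAny p k t) := by
  induction k generalizing fr with
  | zero => simp [pvBIter, pvReachAny]
  | succ k ih =>
    rw [pvBIter, ih, pv_step_any]
    simp [pvReachAny]

theorem pv_removeAt_zero (h : Int) (t : List Int) :
    pvARemoveAt (h :: t) 0 = t := by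
  simp [pvARemoveAt, PySem.List.pyGet?, PySem.List.pyIdx?]

theorem pv_removeAt_neg_one (l : List Int) : pvARemoveAt l (-1) = pvBRmLast l := rfl

theorem pv_rmLast_length (h : Int) (t : List Int) :
    (pvBRmLast (h :: t)).length = t.length := pvARemoveAt_last_length h t

theorem pv_main (L : Nat) (l1 l2 : List Int) (n : Int)
    (hL : l1.length = L) (h2 : 2 ≤ n) (hn : n ≤ (l1.length : Int)) (h22 : l2.length ≠ 0) :
    is_subchord_by_n l1 l2 n
      = pvReachAny (fun t => PySem.Set.issubset (PySem.Set.ofList t) (PySem.Set.ofList l2))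
          (l1.length - n.toNat) l1 := by
  induction L using Nat.strong_induction_on generalizing l1 with
  | _ L ih =>
  cases l1 with
  | nil => simp at hn; omega
  | cons h t =>
  rw [is_subchord_by_n]
  have hlen : (h :: t).length = t.length + 1 := by simp
  rw [if_neg (by simp [h22]), if_neg (by omega), if_neg (by omega)]
  by_cases hle : ((h :: t).length : Int) ≤ n
  · rw [if_pos hle]
    have hk : (h :: t).length - n.toNat = 0 := by omega
    rw [hk, pvReachAny]
  · rw [if_neg hle]
    have hk : (h :: t).length - n.toNat = (t.length - n.toNat) + 1 := by omega
    rw [hk, pvReachAny, pv_removeAt_zero, pv_removeAt_neg_one]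
    have e1 := ih t.length (by omega) t rfl (by omega)
    have e2 := ih (pvBRmLast (h :: t)).length (by rw [pv_rmLast_length]; omega)
      (pvBRmLast (h :: t)) rfl (by rw [pv_rmLast_length]; omega)
    rw [e1, e2, pv_rmLast_length]
    rfl

-- ===== VERDICT (by name: the statement is the Claim_ definition above) =====
theorem is_subchord_by_n_spec : Claim_equal_is_subchord_by_n := by
  intro l1 l2 n _
  unfold Spec_is_subchord_by_n
  rw [is_subchord_by_n_alt]
  by_cases h0 : l1.length = 0 ∨ l2.length = 0
  · rw [is_subchord_by_n, if_pos h0, if_pos h0]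
  · rw [if_neg h0]
    by_cases h1 : n > (l1.length : Int)
    · rw [is_subchord_by_n, if_neg h0, if_pos h1, if_pos h1]
    · rw [if_neg h1]
      by_cases h2 : n < 2
      · rw [is_subchord_by_n, if_neg h0, if_neg h1, if_pos h2, if_pos h2]
      · rw [if_neg h2]
        have hmain := pv_main l1.length l1 l2 n rfl (by omega) (by omega) (by tauto)
        rw [hmain, pv_iter_any]
        simp [PySem.Set.add, PySem.Set.empty]
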